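-- pv_equiv track=rewrite | github.com/michaeldtimpe/luxe | benchmarks/swebench/smoke_inspect.py | _hunks_proximate
-- ===== SOURCE A (Python) =====
-- def _hunks_proximate(
--     model_locs: set[tuple[str, int]],
--     gold_locs: set[tuple[str, int]],
--     tolerance: int = 20,
-- ) -> bool:
--     """At least one model hunk is within `tolerance` lines of a gold
--     hunk in the same file. Empty gold = unmeasurable, give the benefit
--     of the doubt. Tolerance accommodates same-method placement drift
--     (e.g., flask-5014: model line 193 vs gold line 190 — both inside
--     `__init__`, just different positions within it)."""
--     if not gold_locs:
--         return True
--     for mf, ml in model_locs: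
--         for gf, gl in gold_locs:
--             if mf == gf and abs(ml - gl) <= tolerance:
--                 return True
--     return False
-- ===== SOURCE B (Python) =====
-- def _bisect_left(xs, x):
--     lo, hi = 0, len(xs)
--     while lo < hi:
--         mid = (lo + hi) // 2
--         if xs[mid] < x:
--             lo = mid + 1
--         else:
--             hi = mid
--     return lo
--
--
-- def _hunks_proximate(
--     model_locs: set[tuple[str, int]],
--     gold_locs: set[tuple[str, int]],
--     tolerance: int = 20,
-- ) -> bool:
--     if not gold_locs:
--         return True
--     by_file = {}
--     for gf, gl in gold_locs:
--         by_file.setdefault(gf, []).append(gl)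
--     by_file = {f: sorted(ls) for f, ls in by_file.items()}
--     for mf, ml in model_locs:
--         ls = by_file.get(mf, [])
--         i = _bisect_left(ls, ml)
--         if i < len(ls) and ls[i] - ml <= tolerance:
--             return True
--         if i > 0 and ml - ls[i - 1] <= tolerance:
--             return True
--     return False
-- ===== Notes on version B (the rewrite author's own statement) =====
-- stated objective: faster
-- what changed: Replaced the nested model×gold scan with a dict grouping gold lines by file, sorted once, and a binary search for the nearest gold line per model hunk.
import Mathlib
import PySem

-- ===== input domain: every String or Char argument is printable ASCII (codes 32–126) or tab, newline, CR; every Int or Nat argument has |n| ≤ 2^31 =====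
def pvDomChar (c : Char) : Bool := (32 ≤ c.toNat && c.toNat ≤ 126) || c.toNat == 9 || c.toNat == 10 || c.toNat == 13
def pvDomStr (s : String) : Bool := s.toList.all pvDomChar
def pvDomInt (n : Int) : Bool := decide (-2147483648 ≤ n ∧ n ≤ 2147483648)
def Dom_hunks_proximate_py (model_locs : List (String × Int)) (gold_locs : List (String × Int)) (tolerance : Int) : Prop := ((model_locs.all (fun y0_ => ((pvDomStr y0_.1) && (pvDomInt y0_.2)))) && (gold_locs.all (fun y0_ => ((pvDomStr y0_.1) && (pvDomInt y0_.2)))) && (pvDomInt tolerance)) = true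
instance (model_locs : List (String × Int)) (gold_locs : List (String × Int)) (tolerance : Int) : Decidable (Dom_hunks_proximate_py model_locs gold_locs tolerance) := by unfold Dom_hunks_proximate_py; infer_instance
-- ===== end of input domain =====

-- B groups gold lines by file once and binary-searches the sorted lines per model hunk
-- (O((M+G) log G) instead of A's nested O(M*G) scan); return values are provably equal.

-- ===== PORT A =====
-- inner 'for gf, gl in gold_locs' loop with early return
def pvAInner (mf : String) (ml : Int) (tolerance : Int) : List (String × Int) → Bool
  | [] => false
  | (gf, gl) :: rest =>
      if mf == gf && decide (|ml - gl| ≤ tolerance) then true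
      else pvAInner mf ml tolerance rest

-- outer 'for mf, ml in model_locs' loop with early return
def pvAOuter (gold_locs : List (String × Int)) (tolerance : Int) : List (String × Int) → Bool
  | [] => false
  | (mf, ml) :: rest =>
      if pvAInner mf ml tolerance gold_locs then true
      else pvAOuter gold_locs tolerance rest

def hunks_proximate_py (model_locs : List (String × Int)) (gold_locs : List (String × Int)) (tolerance : Int) : Bool :=
  if gold_locs.isEmpty then true
  else pvAOuter gold_locs tolerance model_locs

-- ===== PORT B =====
-- Source B's hand-written _bisect_left: binary search on the (lo, hi) half-open range;
-- xs[mid] is always in range there, ported as getD (exact on in-range indices)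
def pvBisectLeft (xs : List Int) (x : Int) (lo hi : Nat) : Nat :=
  if _h : lo < hi then
    let mid := (lo + hi) / 2
    if xs.getD mid 0 < x then pvBisectLeft xs x (mid + 1) hi
    else pvBisectLeft xs x lo mid
  else lo
termination_by hi - lo
decreasing_by all_goals omega

-- 'by_file.setdefault(gf, []).append(gl)' loop = Dict.modify with default []
def pvGroup (gold_locs : List (String × Int)) : PySem.Dict String (List Int) :=
  gold_locs.foldl (fun d p => d.modify p.1 [] (· ++ [p.2])) PySem.Dict.empty

-- '{f: sorted(ls) for f, ls in by_file.items()}'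
def pvSortGroups (d : PySem.Dict String (List Int)) : PySem.Dict String (List Int) :=
  PySem.Dict.mk (d.items.map (fun p => (p.1, PySem.List.sorted p.2 (fun x => x) false)))

-- per-model-hunk check of Source B's main loop
def pvCheck (byFile : PySem.Dict String (List Int)) (tolerance : Int) (p : String × Int) : Bool :=
  let ls := byFile.getD p.1 []
  let i := pvBisectLeft ls p.2 0 ls.length
  (decide (i < ls.length) && decide (ls.getD i 0 - p.2 ≤ tolerance)) ||
  (decide (0 < i) && decide (p.2 - ls.getD (i - 1) 0 ≤ tolerance))

def hunks_proximate_py_alt (model_locs : List (String × Int)) (gold_locs : List (String × Int)) (tolerance : Int) : Bool :=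
  if gold_locs.isEmpty then true
  else
    let byFile := pvSortGroups (pvGroup gold_locs)
    model_locs.any (pvCheck byFile tolerance)

-- ===== PRECONDITION & SPEC =====
def Spec_hunks_proximate_py (model_locs : List (String × Int)) (gold_locs : List (String × Int)) (tolerance : Int) (out : Bool) : Prop := out = hunks_proximate_py_alt model_locs gold_locs tolerance
instance (model_locs : List (String × Int)) (gold_locs : List (String × Int)) (tolerance : Int) (out : Bool) : Decidable (Spec_hunks_proximate_py model_locs gold_locs tolerance out) := by unfold Spec_hunks_proximate_py; infer_instance

-- ===== CLAIM (what is proved, stated in full; the proofs are below) =====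
def Claim_equal_hunks_proximate_py : Prop := ∀ (model_locs : List (String × Int)) (gold_locs : List (String × Int)) (tolerance : Int), Dom_hunks_proximate_py model_locs gold_locs tolerance → Spec_hunks_proximate_py model_locs gold_locs tolerance (hunks_proximate_py model_locs gold_locs tolerance)

-- ===== LEMMAS AND PROOFS =====

-- A's loops are existential scans
lemma pvAInner_eq_any (mf : String) (ml t : Int) (g : List (String × Int)) :
    pvAInner mf ml t g = g.any (fun q => mf == q.1 && decide (|ml - q.2| ≤ t)) := by
  induction g with
  | nil => rfl
  | cons q rest ih =>
      obtain ⟨gf, gl⟩ := q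
      simp only [pvAInner, List.any_cons]
      split_ifs with h
      · simp [h]
      · simp only [Bool.not_eq_true] at h
        simp [h, ih]

lemma pvAOuter_eq_any (g : List (String × Int)) (t : Int) (m : List (String × Int)) :
    pvAOuter g t m = m.any (fun p => pvAInner p.1 p.2 t g) := by
  induction m with
  | nil => rfl
  | cons p rest ih =>
      obtain ⟨mf, ml⟩ := p
      simp only [pvAOuter, List.any_cons]
      split_ifs with h
      · simp [h]
      · simp only [Bool.not_eq_true] at h
        simp [h, ih]

-- correctness of Source B's hand-written binary search on a sorted segment
lemma pvBisectLeft_spec (xs : List Int) (x : Int)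
    (hs : xs.Pairwise (· ≤ ·)) :
    ∀ lo hi, lo ≤ hi → hi ≤ xs.length →
      lo ≤ pvBisectLeft xs x lo hi ∧ pvBisectLeft xs x lo hi ≤ hi ∧
      (∀ j, lo ≤ j → j < pvBisectLeft xs x lo hi → xs.getD j 0 < x) ∧
      (∀ j, pvBisectLeft xs x lo hi ≤ j → j < hi → x ≤ xs.getD j 0) := by
  have hmono : ∀ i j : Nat, i ≤ j → j < xs.length → xs.getD i 0 ≤ xs.getD j 0 := by
    intro i j hij hj
    rcases Nat.lt_or_ge i j with h | h
    · have := (List.pairwise_iff_getElem.mp hs) i j (by omega) hj h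
      simpa [List.getD_eq_getElem?_getD, List.getElem?_eq_getElem, hj, show i < xs.length by omega] using this
    · have : i = j := by omega
      subst this; exact le_refl _
  intro lo hi
  induction hn : hi - lo using Nat.strong_induction_on generalizing lo hi with
  | _ n ih =>
    intro hlh hhl
    rw [pvBisectLeft]
    by_cases h : lo < hi
    · simp only [h, dif_pos]
      set mid := (lo + hi) / 2 with hmid
      have hm1 : lo ≤ mid := by omega
      have hm2 : mid < hi := by omega
      by_cases hc : xs.getD mid 0 < x
      · simp only [hc, if_pos]
        obtain ⟨h1, h2, h3, h4⟩ := ih (hi - (mid + 1)) (by omega) (mid + 1) hi rfl (by omega) hhl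
        refine ⟨by omega, h2, ?_, h4⟩
        intro j hj1 hj2
        rcases Nat.lt_or_ge j (mid + 1) with hj | hj
        · calc xs.getD j 0 ≤ xs.getD mid 0 := hmono j mid (by omega) (by omega)
            _ < x := hc
        · exact h3 j hj hj2
      · simp only [hc, if_neg, not_false_iff]
        obtain ⟨h1, h2, h3, h4⟩ := ih (mid - lo) (by omega) lo mid rfl (by omega) (by omega)
        refine ⟨h1, by omega, h3, ?_⟩
        intro j hj1 hj2
        have hx : x ≤ xs.getD mid 0 := by omega
        rcases Nat.lt_or_ge j mid with hj | hj
        · exact h4 j hj1 hj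
        · calc x ≤ xs.getD mid 0 := hx
            _ ≤ xs.getD j 0 := hmono mid j hj (by omega)
    · simp only [h, dif_neg, not_false_iff]
      exact ⟨le_refl _, by omega, fun j h1 h2 => by omega, fun j h1 h2 => by omega⟩

-- the binary-search check finds an element within tolerance iff one exists
lemma pvCheck_core (ls : List Int) (hs : ls.Pairwise (· ≤ ·)) (ml t : Int) :
    (let i := pvBisectLeft ls ml 0 ls.length
     ((decide (i < ls.length) && decide (ls.getD i 0 - ml ≤ t)) ||
      (decide (0 < i) && decide (ml - ls.getD (i - 1) 0 ≤ t))) = true)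
    ↔ ∃ l ∈ ls, |ml - l| ≤ t := by
  obtain ⟨-, h2, h3, h4⟩ := pvBisectLeft_spec ls ml hs 0 ls.length (Nat.zero_le _) (le_refl _)
  set i := pvBisectLeft ls ml 0 ls.length with hi
  simp only [Bool.or_eq_true, Bool.and_eq_true, decide_eq_true_eq]
  constructor
  · rintro (⟨hlt, hd⟩ | ⟨hpos, hd⟩)
    · refine ⟨ls.getD i 0, ?_, ?_⟩
      · have : ls.getD i 0 = ls[i] := List.getD_eq_getElem ls 0 hlt
        rw [this]; exact List.getElem_mem _
      · have hge : ml ≤ ls.getD i 0 := h4 i (le_refl _) hlt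
        rw [abs_sub_comm, abs_of_nonneg (by omega)]; exact hd
    · have hlt' : i - 1 < ls.length := by omega
      refine ⟨ls.getD (i - 1) 0, ?_, ?_⟩
      · have : ls.getD (i - 1) 0 = ls[i - 1] := List.getD_eq_getElem ls 0 hlt'
        rw [this]; exact List.getElem_mem _
      · have hlt2 : ls.getD (i - 1) 0 < ml := h3 (i - 1) (Nat.zero_le _) (by omega)
        rw [abs_of_nonneg (by omega)]; exact hd
  · rintro ⟨l, hl, hd⟩
    obtain ⟨j, hj, rfl⟩ := List.getElem_of_mem hl
    have hgd : ls[j] = ls.getD j 0 := (List.getD_eq_getElem ls 0 hj).symm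
    have hmono : ∀ p q : Nat, p ≤ q → q < ls.length → ls.getD p 0 ≤ ls.getD q 0 := by
      intro p q hpq hq
      rcases Nat.lt_or_ge p q with h | h
      · have := (List.pairwise_iff_getElem.mp hs) p q (by omega) hq h
        simpa [List.getD_eq_getElem?_getD, List.getElem?_eq_getElem, hq, show p < ls.length by omega] using this
      · have : p = q := by omega
        subst this; exact le_refl _
    rcases Nat.lt_or_ge j i with hji | hji
    · -- element left of the insertion point: check ls[i-1]
      right
      have hlow : ls.getD j 0 < ml := h3 j (Nat.zero_le _) hji
      have him1 : i - 1 < ls.length := by omega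
      have : ls.getD j 0 ≤ ls.getD (i - 1) 0 := hmono j (i - 1) (by omega) him1
      refine ⟨by omega, ?_⟩
      have habs : ml - ls.getD j 0 ≤ t := by
        rw [hgd, abs_of_nonneg (by omega)] at hd; exact hd
      omega
    · -- element at or right of the insertion point: check ls[i]
      left
      have hilt : i < ls.length := by omega
      have hge : ml ≤ ls.getD i 0 := h4 i (le_refl _) hilt
      have : ls.getD i 0 ≤ ls.getD j 0 := hmono i j hji hj
      refine ⟨hilt, ?_⟩
      have habs : ls.getD j 0 - ml ≤ t := by
        rw [hgd, abs_sub_comm, abs_of_nonneg (by omega)] at hd; exact hd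
      omega

-- looking up in the sorted-groups dict = sorting the raw group
lemma pvSortGroups_getD (d : PySem.Dict String (List Int)) (k : String) :
    (pvSortGroups d).getD k [] = PySem.List.sorted (d.getD k []) (fun x => x) false := by
  obtain ⟨items⟩ := d
  simp only [pvSortGroups, PySem.Dict.getD_eq_get?_getD]
  induction items with
  | nil => rfl
  | cons p rest ih =>
      obtain ⟨f, ls⟩ := p
      simp only [List.map_cons, PySem.Dict.get?_mk_cons]
      by_cases h : f == k
      · simp [h]
      · simp only [h, Bool.false_eq_true, if_false]
        exact ih

-- the raw group for file k holds exactly the gold lines of file k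
lemma pvGroup_getD (g : List (String × Int)) (k : String) :
    (pvGroup g).getD k [] = (g.filter (fun p => p.1 == k)).map (·.2) := by
  have := PySem.Dict.getD_foldl_modify_append (l := g) (d := PySem.Dict.empty) (c := k)
  simpa [pvGroup, PySem.Dict.getD_empty] using this

-- membership in the sorted group lines, phrased over the gold pairs
lemma mem_group_iff (g : List (String × Int)) (mf : String) (l : Int) :
    l ∈ (pvSortGroups (pvGroup g)).getD mf [] ↔ (mf, l) ∈ g := by
  rw [pvSortGroups_getD, PySem.List.mem_sorted, pvGroup_getD]
  simp only [List.mem_map, List.mem_filter, beq_iff_eq]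
  constructor
  · rintro ⟨⟨pf, pl⟩, ⟨hp, rfl⟩, rfl⟩
    exact hp
  · intro h
    exact ⟨(mf, l), ⟨h, rfl⟩, rfl⟩

-- per model hunk: the binary-search check agrees with A's inner scan
lemma pvCheck_eq_inner (g : List (String × Int)) (t : Int) (mf : String) (ml : Int) :
    pvCheck (pvSortGroups (pvGroup g)) t (mf, ml) = pvAInner mf ml t g := by
  rw [pvAInner_eq_any]
  have hsorted : ((pvSortGroups (pvGroup g)).getD mf []).Pairwise (· ≤ ·) := by
    rw [pvSortGroups_getD]
    exact PySem.List.sorted_pairwise _ _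
  have hcore := pvCheck_core ((pvSortGroups (pvGroup g)).getD mf []) hsorted ml t
  rw [Bool.eq_iff_iff]
  constructor
  · intro h
    rw [List.any_eq_true]
    obtain ⟨l, hl, hd⟩ := hcore.mp (by simpa [pvCheck] using h)
    exact ⟨(mf, l), (mem_group_iff g mf l).mp hl, by simp [hd]⟩
  · intro hany
    rw [List.any_eq_true] at hany
    obtain ⟨⟨gf, gl⟩, hmem, hq⟩ := hany
    simp only [Bool.and_eq_true, beq_iff_eq, decide_eq_true_eq] at hq
    obtain ⟨rfl, hd⟩ := hq
    have := hcore.mpr ⟨gl, (mem_group_iff g mf gl).mpr hmem, hd⟩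
    simpa [pvCheck] using this

-- ===== VERDICT (by name: the statement is the Claim_ definition above) =====
theorem hunks_proximate_py_spec : Claim_equal_hunks_proximate_py := by
  intro m g t _
  unfold Spec_hunks_proximate_py hunks_proximate_py hunks_proximate_py_alt
  by_cases hg : g.isEmpty
  · simp [hg]
  · simp only [hg, Bool.false_eq_true, if_false]
    rw [pvAOuter_eq_any]
    congr 1
    funext p
    exact (pvCheck_eq_inner g t p.1 p.2).symm
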